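-- pv_equiv track=rewrite | github.com/lesomPas/MinecraftBE-RawJson | src/RawJson/main.py | arrayProcessing
-- ===== SOURCE A (Python) =====
-- priority = {
--     "translate": 4,
--     "text": 3,
--     "score": 2,
--     "selector": 1,
--     None: 0
-- }
--
-- def arrayProcessing(dictionary: dict) -> dict:
--     results = None
--     for sentence in dictionary.keys():
--         if (p := priority.get(sentence, -1)) == -1:
--             raise ValueError("dictionary error")
--         if p >= priority[results]:
--             results = sentence
--     return {results: dictionary[results]} if results is not None else {}
-- ===== SOURCE B (Python) =====
-- priority = {
--     "translate": 4,
--     "text": 3,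
--     "score": 2,
--     "selector": 1,
--     None: 0
-- }
--
-- def arrayProcessing(dictionary: dict) -> dict:
--     for key in dictionary:
--         if key not in priority:
--             raise ValueError("dictionary error")
--     for key in ("translate", "text", "score", "selector"):
--         if key in dictionary:
--             return {key: dictionary[key]}
--     return {}
-- ===== Notes on version B (the rewrite author's own statement) =====
-- stated objective: simpler
-- what changed: Replaces A's running-argmax scan over the dict keys (tracking the best key seen, with a sentinel None of priority 0) by a validation pass over the keys followed by a fixed priority-ordered probe of the four known keys, returning the first one present.
import Mathlib
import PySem

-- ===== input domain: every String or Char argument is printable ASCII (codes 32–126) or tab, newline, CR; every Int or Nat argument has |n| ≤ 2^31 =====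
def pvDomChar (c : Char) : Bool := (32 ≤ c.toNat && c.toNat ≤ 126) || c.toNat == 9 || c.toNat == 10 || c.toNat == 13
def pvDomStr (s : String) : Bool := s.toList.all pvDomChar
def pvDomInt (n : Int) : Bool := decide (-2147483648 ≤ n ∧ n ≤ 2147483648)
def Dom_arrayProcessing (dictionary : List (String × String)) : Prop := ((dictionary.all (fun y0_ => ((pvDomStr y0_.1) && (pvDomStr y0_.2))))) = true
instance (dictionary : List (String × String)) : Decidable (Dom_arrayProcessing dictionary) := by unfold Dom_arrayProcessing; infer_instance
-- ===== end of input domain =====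

-- B replaces A's argmax scan over the dict's keys by a validation pass plus a fixed
-- priority-ordered probe of the four known keys (objective: simpler).

-- ===== PORT A =====
-- priority.get(sentence, -1) restricted to String keys (the None key is unreachable here)
def prioGet (s : String) : Int :=
  if s = "translate" then 4 else if s = "text" then 3
  else if s = "score" then 2 else if s = "selector" then 1 else -1

-- priority[results] for results = None or a previously accepted (valid) key
def prioOpt : Option String → Int
  | none => 0
  | some s => prioGet s

-- the for-loop; `none` result = the ValueError was raised (excluded by Pre_)
def aLoop : List String → Option String → Option (Option String)
  | [], res => some res
  | k :: ks, res =>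
    let p := prioGet k
    if p = -1 then none
    else if p ≥ prioOpt res then aLoop ks (some k) else aLoop ks res

def arrayProcessing (dictionary : List (String × String)) : List (String × String) :=
  match aLoop (PySem.Dict.ofList dictionary).keys none with
  | none => []                       -- raise ValueError: outside Pre_
  | some none => []
  | some (some r) => [(r, (PySem.Dict.ofList dictionary).getD r "")]  -- exact: r is always a key of the dict here

-- ===== PORT B =====
def bCands : List String := ["translate", "text", "score", "selector"]

def bProbe (d : PySem.Dict String String) : List String → List (String × String)
  | [] => []
  | c :: cs => if d.contains c then [(c, d.getD c "")] else bProbe d cs  -- exact: c is a key of d in the then-branch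

def arrayProcessing_alt (dictionary : List (String × String)) : List (String × String) :=
  if (PySem.Dict.ofList dictionary).keys.all (fun k => decide (k ∈ bCands)) then
    bProbe (PySem.Dict.ofList dictionary) bCands
  else []                            -- raise ValueError: outside Pre_

-- ===== PRECONDITION & SPEC =====
-- Exactly the inputs on which the Python A returns: every key is one of the four known ones
-- (otherwise A raises ValueError("dictionary error")).
def Pre_arrayProcessing (dictionary : List (String × String)) : Prop :=
  ∀ p ∈ dictionary, p.1 ∈ ["translate", "text", "score", "selector"]
instance (dictionary : List (String × String)) : Decidable (Pre_arrayProcessing dictionary) := by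
  unfold Pre_arrayProcessing; infer_instance

def pvWitness_arrayProcessing : (List (String × String)) := [("text", "hi"), ("score", "1")]

def Spec_arrayProcessing (dictionary : List (String × String)) (out : List (String × String)) : Prop := out = arrayProcessing_alt dictionary
instance (dictionary : List (String × String)) (out : List (String × String)) : Decidable (Spec_arrayProcessing dictionary out) := by unfold Spec_arrayProcessing; infer_instance

-- ===== CLAIM (what is proved, stated in full; the proofs are below) =====
def Claim_equal_arrayProcessing : Prop := ∀ (dictionary : List (String × String)), Dom_arrayProcessing dictionary → Pre_arrayProcessing dictionary → Spec_arrayProcessing dictionary (arrayProcessing dictionary)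

-- ===== LEMMAS AND PROOFS =====

-- the pure argmax step of A's loop
def aStep (res : Option String) (k : String) : Option String :=
  if prioGet k ≥ prioOpt res then some k else res

-- the if-chain B's probe amounts to, expressed on a key list
def pick (ks : List String) : Option String :=
  if "translate" ∈ ks then some "translate"
  else if "text" ∈ ks then some "text"
  else if "score" ∈ ks then some "score"
  else if "selector" ∈ ks then some "selector"
  else none

lemma aLoop_eq_foldl (ks : List String) (res : Option String)
    (h : ∀ k ∈ ks, k ∈ bCands) : aLoop ks res = some (ks.foldl aStep res) := by
  induction ks generalizing res with
  | nil => rfl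
  | cons k ks ih =>
    have hk : k ∈ bCands := h k (List.mem_cons_self)
    have hne : ¬ prioGet k = -1 := by
      fin_cases hk <;> simp [prioGet]
    simp only [aLoop, List.foldl_cons, aStep]
    rw [if_neg hne]
    split_ifs with hge
    · exact ih _ (fun k hk => h k (List.mem_cons_of_mem _ hk))
    · exact ih _ (fun k hk => h k (List.mem_cons_of_mem _ hk))

lemma pick_snoc (ks : List String) (k : String) (hk : k ∈ bCands) :
    pick (ks ++ [k]) = aStep (pick ks) k := by
  fin_cases hk <;>
    simp only [pick, List.mem_append, List.mem_singleton] <;>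
    split_ifs <;>
    simp_all [aStep, prioGet, prioOpt]

lemma foldl_aStep_eq_pick (ks : List String) (h : ∀ k ∈ ks, k ∈ bCands) :
    ks.foldl aStep none = pick ks := by
  induction ks using List.reverseRecOn with
  | nil => rfl
  | append_singleton ks k ih =>
    rw [List.foldl_append, List.foldl_cons, List.foldl_nil,
        pick_snoc ks k (h k (by simp)), ← ih (fun x hx => h x (by simp [hx]))]

lemma bProbe_eq_pick (d : PySem.Dict String String) :
    bProbe d bCands = match pick d.keys with
      | none => []
      | some r => [(r, d.getD r "")] := by
  simp only [bCands, bProbe, PySem.Dict.contains_eq_decide_mem_keys, decide_eq_true_eq]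
  unfold pick
  split_ifs <;> rfl

lemma keys_valid (dictionary : List (String × String))
    (h : Pre_arrayProcessing dictionary) :
    ∀ k ∈ (PySem.Dict.ofList dictionary).keys, k ∈ bCands := by
  intro k hk
  have : (PySem.Dict.ofList dictionary).keys = PySem.Set.ofList (dictionary.map (·.1)) := by
    unfold PySem.Dict.ofList PySem.Dict.update
    rw [PySem.Dict.keys_foldl_insert_key, PySem.Dict.keys_empty, PySem.Set.update_nil_left]
  rw [this, PySem.Set.mem_ofList] at hk
  obtain ⟨p, hp, rfl⟩ := List.mem_map.mp hk
  exact h p hp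

-- ===== VERDICT (by name: the statement is the Claim_ definition above) =====
theorem arrayProcessing_spec : Claim_equal_arrayProcessing := by
  intro dictionary _ hpre
  unfold Spec_arrayProcessing arrayProcessing arrayProcessing_alt
  have hv := keys_valid dictionary hpre
  rw [aLoop_eq_foldl _ _ hv, foldl_aStep_eq_pick _ hv, bProbe_eq_pick]
  rw [if_pos (by simpa [List.all_eq_true] using hv)]
  cases pick (PySem.Dict.ofList dictionary).keys <;> rfl
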